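-- pv_equiv track=rewrite | github.com/ihgazni2/dlixhict-didactic | xdict/elist.py | index_lastnot
-- ===== SOURCE A (Python) =====
-- def index_lastnot(ol,value):
--     '''
--         from xdict.elist import *
--         ol = [1,'a',3,'a',4,'a',5]
--         index_lastnot(ol,'a')
--         ####lastIndexOfnot is the same as index_lastnot
--     '''
--     length = ol.__len__()
--     for i in range(length-1,-1,-1):
--         if(value == ol[i]):
--             pass
--         else:
--             return(i)
--     return(None)
-- ===== SOURCE B (Python) =====
-- def index_lastnot(ol, value):
--     result = None
--     for i, x in enumerate(ol):
--         if value == x: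
--             pass
--         else:
--             result = i
--     return result
-- ===== Notes on version B (the rewrite author's own statement) =====
-- stated objective: alternative
-- what changed: Replaces A's reverse scan with early return by a single forward pass keeping a running last-mismatch index in an accumulator.
import Mathlib
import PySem

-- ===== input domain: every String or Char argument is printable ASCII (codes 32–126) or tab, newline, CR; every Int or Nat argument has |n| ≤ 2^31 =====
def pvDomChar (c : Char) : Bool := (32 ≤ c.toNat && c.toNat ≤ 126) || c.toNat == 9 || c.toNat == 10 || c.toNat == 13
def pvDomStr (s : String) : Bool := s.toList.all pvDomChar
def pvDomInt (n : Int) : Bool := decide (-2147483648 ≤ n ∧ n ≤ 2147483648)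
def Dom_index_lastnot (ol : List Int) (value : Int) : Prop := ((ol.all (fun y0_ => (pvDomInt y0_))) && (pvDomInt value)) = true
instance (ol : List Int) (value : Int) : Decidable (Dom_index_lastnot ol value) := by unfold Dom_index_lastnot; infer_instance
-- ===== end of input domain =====

-- B replaces A's reverse scan (early return at the last mismatch) by a forward pass
-- keeping a running last-mismatch index; same O(n) cost, alternative decomposition.

-- ===== PORT A =====
-- the reverse loop `for i in range(length-1,-1,-1)`: recursion on the count of
-- remaining indices; at fuel i+1 the current index is i (in range, so getD is exact)
def indexLastnotGo (ol : List Int) (value : Int) : Nat → Option Int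
  | 0 => none
  | i + 1 => if value == ol.getD i 0 then indexLastnotGo ol value i else some (i : Int)

def index_lastnot (ol : List Int) (value : Int) : Option Int :=
  indexLastnotGo ol value ol.length

-- ===== PORT B =====
-- forward pass over enumerate(ol): fold updating the accumulator at each mismatch
def index_lastnot_alt (ol : List Int) (value : Int) : Option Int :=
  (ol.zipIdx).foldl (fun result p => if value == p.1 then result else some (p.2 : Int)) none

-- ===== PRECONDITION & SPEC =====
def Spec_index_lastnot (ol : List Int) (value : Int) (out : Option Int) : Prop := out = index_lastnot_alt ol value
instance (ol : List Int) (value : Int) (out : Option Int) : Decidable (Spec_index_lastnot ol value out) := by unfold Spec_index_lastnot; infer_instance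

-- ===== CLAIM (what is proved, stated in full; the proofs are below) =====
def Claim_equal_index_lastnot : Prop := ∀ (ol : List Int) (value : Int), Dom_index_lastnot ol value → Spec_index_lastnot ol value (index_lastnot ol value)

-- ===== LEMMAS AND PROOFS =====

-- the reverse scan never reads indices ≥ n, so a snoc does not change it below n
lemma go_append (l : List Int) (a value : Int) :
    ∀ n, n ≤ l.length → indexLastnotGo (l ++ [a]) value n = indexLastnotGo l value n := by
  intro n
  induction n with
  | zero => intro _; rfl
  | succ i ih =>
    intro h
    have hi : i < l.length := Nat.lt_of_succ_le h
    simp only [indexLastnotGo, List.getD, List.getElem?_append_left hi, ih (Nat.le_of_lt hi)]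
    rfl

lemma main_eq (value : Int) (ol : List Int) :
    indexLastnotGo ol value ol.length
      = (ol.zipIdx).foldl (fun result p => if value == p.1 then result else some (p.2 : Int)) none := by
  induction ol using List.reverseRecOn with
  | nil => rfl
  | append_singleton l a ih =>
    have hz : (l ++ [a]).zipIdx = l.zipIdx ++ [(a, l.length)] := by
      simp [List.zipIdx_append]
    rw [hz, List.foldl_append]
    have hlen : (l ++ [a]).length = l.length + 1 := by simp
    rw [hlen]
    simp only [indexLastnotGo, List.getD, List.getElem?_append_right (Nat.le_refl l.length),
      Nat.sub_self, List.foldl_cons, List.foldl_nil]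
    by_cases h : value == a
    · simp [h, go_append l a value l.length (Nat.le_refl _), ih]
    · simp [h]

-- ===== VERDICT (by name: the statement is the Claim_ definition above) =====
theorem index_lastnot_spec : Claim_equal_index_lastnot := by
  intro ol value _
  unfold Spec_index_lastnot index_lastnot index_lastnot_alt
  exact main_eq value ol
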